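-- pv_equiv track=rewrite | github.com/emmadeno/public-opinion-tech-SIR | lib/processing.py | flatten_topic_assignments
-- ===== SOURCE A (Python) =====
-- def flatten_topic_assignments(topics, distribution):
--     topics_set = set([i for i in topics if i != "random"])
--     final_dict = {}
--     for topic in topics_set:
--         indexes = [i for i, x in enumerate(topics) if (x == topic and x != "random")]
--         total_distr = 0
--         for i in indexes: total_distr += distribution[i]
--         final_dict[tuple(indexes)] = total_distr
--     return final_dict
-- ===== SOURCE B (Python) =====
-- def flatten_topic_assignments(topics, distribution):
--     groups = {}
--     for i, t in enumerate(topics):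
--         if t != "random":
--             groups.setdefault(t, []).append(i)
--     return {tuple(ix): sum(distribution[i] for i in ix) for ix in groups.values()}
-- ===== Notes on version B (the rewrite author's own statement) =====
-- stated objective: faster
-- what changed: B groups indexes by topic in one pass over enumerate(topics) with a dict (setdefault/append) instead of A's scan of the whole topics list once per distinct topic.
import Mathlib
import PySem

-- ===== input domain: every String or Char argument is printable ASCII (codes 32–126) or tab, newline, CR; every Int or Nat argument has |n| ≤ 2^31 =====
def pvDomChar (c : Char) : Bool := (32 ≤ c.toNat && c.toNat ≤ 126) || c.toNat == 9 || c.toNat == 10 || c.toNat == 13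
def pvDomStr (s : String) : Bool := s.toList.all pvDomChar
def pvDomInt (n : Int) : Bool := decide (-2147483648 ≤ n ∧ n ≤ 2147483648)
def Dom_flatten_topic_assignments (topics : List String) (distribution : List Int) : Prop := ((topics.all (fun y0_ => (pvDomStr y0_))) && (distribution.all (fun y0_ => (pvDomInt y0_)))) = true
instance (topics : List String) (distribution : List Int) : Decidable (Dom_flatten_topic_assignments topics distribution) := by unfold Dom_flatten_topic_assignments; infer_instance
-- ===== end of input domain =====

-- B replaces A's per-distinct-topic rescans of the whole topics list by a single grouping pass (objective: faster).
-- Python A iterates over a set in hash order; both ports use first-insertion order, and dict outputs are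
-- compared ignoring order, so the association-list order here is the ports' (not CPython's hash) order.

-- ===== PORT A =====
-- distribution[i] is ported as pyGetD with default 0; Pre_ excludes the out-of-range inputs (Python raises IndexError there)
def flatten_topic_assignments (topics : List String) (distribution : List Int) : List (List Int × Int) :=
  let topics_set : PySem.Set String :=
    PySem.Set.ofList (topics.foldl (fun acc i => if i != "random" then acc ++ [i] else acc) [])
  let final_dict : PySem.Dict (List Int) Int :=
    topics_set.foldl (fun final_dict topic =>
      let indexes : List Int :=
        (PySem.List.enumerate topics).foldl
          (fun acc p => if p.2 == topic && p.2 != "random" then acc ++ [p.1] else acc) []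
      let total_distr : Int :=
        indexes.foldl (fun acc i => acc + PySem.List.pyGetD distribution i 0) 0
      final_dict.insert indexes total_distr) PySem.Dict.empty
  final_dict.items

-- ===== PORT B =====
def flatten_topic_assignments_alt (topics : List String) (distribution : List Int) : List (List Int × Int) :=
  let groups : PySem.Dict String (List Int) :=
    (PySem.List.enumerate topics).foldl
      (fun d p => if p.2 != "random" then d.modify p.2 [] (· ++ [p.1]) else d) PySem.Dict.empty
  (groups.values.foldl
      (fun d ix => d.insert ix ((ix.map (fun i => PySem.List.pyGetD distribution i 0)).sum))
      PySem.Dict.empty).items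

-- ===== PRECONDITION & SPEC =====
-- A raises IndexError when some non-"random" topic sits at a position ≥ len(distribution); Pre_ excludes exactly those inputs.
def Pre_flatten_topic_assignments (topics : List String) (distribution : List Int) : Prop :=
  ∀ k, (h : k < topics.length) → topics[k] ≠ "random" → k < distribution.length
instance (topics : List String) (distribution : List Int) : Decidable (Pre_flatten_topic_assignments topics distribution) := by unfold Pre_flatten_topic_assignments; infer_instance
def pvWitness_flatten_topic_assignments : List String × List Int := (["a", "random", "a", "b"], [1, 2, 3, 4])
def Spec_flatten_topic_assignments (topics : List String) (distribution : List Int) (out : List (List Int × Int)) : Prop := out = flatten_topic_assignments_alt topics distribution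
instance (topics : List String) (distribution : List Int) (out : List (List Int × Int)) : Decidable (Spec_flatten_topic_assignments topics distribution out) := by unfold Spec_flatten_topic_assignments; infer_instance

-- ===== CLAIM (what is proved, stated in full; the proofs are below) =====
def Claim_equal_flatten_topic_assignments : Prop := ∀ (topics : List String) (distribution : List Int), Dom_flatten_topic_assignments topics distribution → Pre_flatten_topic_assignments topics distribution → Spec_flatten_topic_assignments topics distribution (flatten_topic_assignments topics distribution)

-- ===== LEMMAS AND PROOFS =====

-- B's grouping dict, characterised: its values are, per distinct non-"random" topic in first-occurrence
-- order, exactly the index list A recomputes for that topic by rescanning enumerate(topics).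
theorem groups_values (topics : List String) :
    (((PySem.List.enumerate topics).filter (fun p => p.2 != "random")).foldl
        (fun d p => d.modify p.2 [] (· ++ [p.1])) PySem.Dict.empty).values
      = (PySem.Set.ofList (topics.filter (fun i => i != "random"))).map
          (fun t => ((PySem.List.enumerate topics).filter
              (fun a => (a.2 == t) && (a.2 != "random"))).map Prod.fst) := by
  set Q := (PySem.List.enumerate topics).filter (fun p => p.2 != "random") with hQ
  have hnd : (Q.foldl (fun d p => d.modify p.2 [] (· ++ [p.1])) PySem.Dict.empty).keys.Nodup := by
    apply PySem.Dict.nodup_keys_foldl_modify_key Q (fun p => p.2) [] (fun _ p => (· ++ [p.1]))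
    simp [PySem.Dict.keys_empty]
  rw [PySem.Dict.values_eq_map_keys _ hnd []]
  have hkeys : (Q.foldl (fun d p => d.modify p.2 [] (· ++ [p.1])) PySem.Dict.empty).keys
      = PySem.Set.ofList (topics.filter (fun i => i != "random")) := by
    rw [PySem.Dict.keys_foldl_modify_key Q (fun p => p.2) [] (fun _ p => (· ++ [p.1]))]
    have h2 : Q.map (fun p => p.2) = topics.filter (fun i => i != "random") := by
      rw [hQ]
      conv_rhs => rw [← PySem.List.map_snd_enumerate topics 0]
      rw [List.filter_map]; rfl
    simp [PySem.Dict.keys_empty, PySem.Set.update_nil_left, h2]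
  rw [hkeys]
  apply List.map_congr_left
  intro t _
  have hswap : Q.foldl (fun d p => d.modify p.2 [] (· ++ [p.1])) PySem.Dict.empty
      = (Q.map Prod.swap).foldl (fun d q => d.modify q.1 [] (· ++ [q.2])) PySem.Dict.empty := by
    rw [List.foldl_map]; simp [Prod.fst_swap, Prod.snd_swap]
  rw [hswap, PySem.Dict.getD_foldl_modify_append]
  simp only [PySem.Dict.getD_empty, List.nil_append]
  rw [List.filter_map, List.map_map, hQ, List.filter_filter]
  rfl

-- ===== VERDICT (by name: the statement is the Claim_ definition above) =====
theorem flatten_topic_assignments_spec : Claim_equal_flatten_topic_assignments := by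
  intro topics distribution _ _
  unfold Spec_flatten_topic_assignments flatten_topic_assignments flatten_topic_assignments_alt
  simp only [PySem.List.foldl_if_eq_foldl_filter, PySem.List.foldl_append_singleton_eq_map,
    PySem.List.foldl_add, List.nil_append, zero_add]
  rw [groups_values, List.foldl_map]
  simp only [List.map_id']
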